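-- pv_equiv track=rewrite | github.com/NCMlab/CognitiveTasks | GUI/NeuroPsychBatterySite02.py | CreateVSTMList5
-- ===== SOURCE A (Python) =====
-- def CreateVSTMList5(VSTMCapacity):
--      Limit = int(round(float(VSTMCapacity) + 1))
--      if Limit > 25:
--          Limit = 25
--      elif Limit < 5:
--          Limit = 5
--      VSTMList = {}
--      VSTMList['5']=[1,2,3,4,5]
--      VSTMList['6']=[1,3,4,5,6]
--      VSTMList['7']=[1,3,5,6,7]
--      VSTMList['8']=[1,3,6,7,8]
--      VSTMList['9']=[1,3,6,8,9]
--      VSTMList['10']=[1,3,6,9,10]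
--      VSTMList['11']=[1,3,6,10,11]
--      VSTMList['12']=[1,3,6,11,12]
--      VSTMList['13']=[1,3,6,12,13]
--      VSTMList['14']=[1,3,6,13,14]
--      VSTMList['15']=[1,3,6,14,15]
--      VSTMList['16']=[1,3,6,15,16]
--      VSTMList['17']=[1,3,6,16,17]
--      VSTMList['18']=[1,3,6,17,18]
--      VSTMList['19']=[1,3,6,18,19]
--      VSTMList['20']=[1,3,6,19,20]
--      VSTMList['21']=[1,3,6,20,21]
--      VSTMList['22']=[1,3,6,21,22]
--      VSTMList['23']=[1,3,6,22,23]
--      VSTMList['24']=[1,3,6,23,24]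
--      VSTMList['25']=[1,3,6,24,25]
--
--      OutList = VSTMList[str(Limit)]
--      OutList = ' '.join(str(e) for e in OutList)
--      return OutList
-- ===== SOURCE B (Python) =====
-- def CreateVSTMList5(VSTMCapacity):
--     Limit = int(round(float(VSTMCapacity) + 1))
--     if Limit > 25:
--         Limit = 25
--     elif Limit < 5:
--         Limit = 5
--     if Limit >= 8:
--         seq = [1, 3, 6, Limit - 1, Limit]
--     elif Limit == 5:
--         seq = [1, 2, 3, 4, 5]
--     elif Limit == 6:
--         seq = [1, 3, 4, 5, 6]
--     else:
--         seq = [1, 3, 5, 6, 7]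
--     return ' '.join(str(e) for e in seq)
-- ===== Notes on version B (the rewrite author's own statement) =====
-- stated objective: simpler
-- what changed: Replaced the string-keyed lookup table built per call by a closed-form arithmetic sequence for the regular capacities plus three literal low cases.
import Mathlib
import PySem

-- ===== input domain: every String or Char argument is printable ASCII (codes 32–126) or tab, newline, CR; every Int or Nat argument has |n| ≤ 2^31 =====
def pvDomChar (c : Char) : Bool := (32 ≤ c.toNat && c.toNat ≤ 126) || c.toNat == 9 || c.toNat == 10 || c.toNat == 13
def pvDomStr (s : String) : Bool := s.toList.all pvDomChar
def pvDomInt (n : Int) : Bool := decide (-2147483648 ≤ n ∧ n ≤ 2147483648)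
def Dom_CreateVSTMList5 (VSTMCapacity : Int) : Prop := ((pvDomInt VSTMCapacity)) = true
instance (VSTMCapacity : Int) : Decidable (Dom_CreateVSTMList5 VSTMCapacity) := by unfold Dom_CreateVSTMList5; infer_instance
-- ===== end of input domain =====

-- B replaces the 21-row lookup table by a closed-form sequence for Limit >= 8 (simpler; same values).
-- ===== PORT A =====
def CreateVSTMList5 (VSTMCapacity : Int) : String :=
  -- int(round(float(VSTMCapacity) + 1)) is exactly VSTMCapacity + 1 on Dom (|n| ≤ 2^31, float exact)
  let Limit := VSTMCapacity + 1
  let Limit := if Limit > 25 then (25 : Int) else if Limit < 5 then 5 else Limit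
  let d : PySem.Dict String (List Int) := (PySem.Dict.empty)
    |>.insert "5" [1, 2, 3, 4, 5]
    |>.insert "6" [1, 3, 4, 5, 6]
    |>.insert "7" [1, 3, 5, 6, 7]
    |>.insert "8" [1, 3, 6, 7, 8]
    |>.insert "9" [1, 3, 6, 8, 9]
    |>.insert "10" [1, 3, 6, 9, 10]
    |>.insert "11" [1, 3, 6, 10, 11]
    |>.insert "12" [1, 3, 6, 11, 12]
    |>.insert "13" [1, 3, 6, 12, 13]
    |>.insert "14" [1, 3, 6, 13, 14]
    |>.insert "15" [1, 3, 6, 14, 15]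
    |>.insert "16" [1, 3, 6, 15, 16]
    |>.insert "17" [1, 3, 6, 16, 17]
    |>.insert "18" [1, 3, 6, 17, 18]
    |>.insert "19" [1, 3, 6, 18, 19]
    |>.insert "20" [1, 3, 6, 19, 20]
    |>.insert "21" [1, 3, 6, 20, 21]
    |>.insert "22" [1, 3, 6, 21, 22]
    |>.insert "23" [1, 3, 6, 22, 23]
    |>.insert "24" [1, 3, 6, 23, 24]
    |>.insert "25" [1, 3, 6, 24, 25]
  let OutList := (d.get? (PySem.Int.toStr Limit)).getD []  -- key always present; KeyError unreachable
  PySem.Str.join " " (OutList.map PySem.Int.toStr)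

-- ===== PORT B =====
def CreateVSTMList5_alt (VSTMCapacity : Int) : String :=
  let Limit := VSTMCapacity + 1
  let Limit := if Limit > 25 then (25 : Int) else if Limit < 5 then 5 else Limit
  let seq : List Int :=
    if Limit >= 8 then [1, 3, 6, Limit - 1, Limit]
    else if Limit = 5 then [1, 2, 3, 4, 5]
    else if Limit = 6 then [1, 3, 4, 5, 6]
    else [1, 3, 5, 6, 7]
  PySem.Str.join " " (seq.map PySem.Int.toStr)


-- ===== PRECONDITION & SPEC =====
def Spec_CreateVSTMList5 (VSTMCapacity : Int) (out : String) : Prop := out = CreateVSTMList5_alt VSTMCapacity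
instance (VSTMCapacity : Int) (out : String) : Decidable (Spec_CreateVSTMList5 VSTMCapacity out) := by unfold Spec_CreateVSTMList5; infer_instance

-- ===== CLAIM (what is proved, stated in full; the proofs are below) =====
def Claim_equal_CreateVSTMList5 : Prop := ∀ (VSTMCapacity : Int), Dom_CreateVSTMList5 VSTMCapacity → Spec_CreateVSTMList5 VSTMCapacity (CreateVSTMList5 VSTMCapacity)

-- ===== LEMMAS AND PROOFS =====

-- ===== VERDICT (by name: the statement is the Claim_ definition above) =====
theorem CreateVSTMList5_spec : Claim_equal_CreateVSTMList5 := by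
  intro v _
  unfold Spec_CreateVSTMList5 CreateVSTMList5 CreateVSTMList5_alt
  by_cases h1 : v + 1 > 25
  · simp only [if_pos h1]; decide
  · simp only [if_neg h1]
    by_cases h2 : v + 1 < 5
    · simp only [if_pos h2]; decide
    · simp only [if_neg h2]
      have hl : 4 ≤ v := by omega
      have hu : v ≤ 24 := by omega
      interval_cases v <;> decide
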